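-- pv_equiv track=rewrite | github.com/gboye/Divers | SWiM_Network.py | sortCliques
-- ===== SOURCE A (Python) =====
-- def sortCliques(cliques):
--     result={}
--     for clique in cliques:
--         lClique=len(set([c.rsplit("-",1)[1] for c in clique]))
--         if lClique not in result:
--             result[lClique]=[]
--         result[lClique].append(clique)
--     return result
-- ===== SOURCE B (Python) =====
-- def sortCliques(cliques):
--     ks = [len({c.rsplit("-", 1)[1] for c in clique}) for clique in cliques]
--     return {k: [cl for cl, kk in zip(cliques, ks) if kk == k]
--             for k in dict.fromkeys(ks)}
-- ===== Notes on version B (the rewrite author's own statement) =====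
-- stated objective: alternative
-- what changed: Replaces the one-pass dict accumulation (membership test + append per clique) with a two-pass group-by: precompute each clique's distinct-suffix count, dedup the counts in first-occurrence order, then build the result with one filtering comprehension per key.
import Mathlib
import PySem

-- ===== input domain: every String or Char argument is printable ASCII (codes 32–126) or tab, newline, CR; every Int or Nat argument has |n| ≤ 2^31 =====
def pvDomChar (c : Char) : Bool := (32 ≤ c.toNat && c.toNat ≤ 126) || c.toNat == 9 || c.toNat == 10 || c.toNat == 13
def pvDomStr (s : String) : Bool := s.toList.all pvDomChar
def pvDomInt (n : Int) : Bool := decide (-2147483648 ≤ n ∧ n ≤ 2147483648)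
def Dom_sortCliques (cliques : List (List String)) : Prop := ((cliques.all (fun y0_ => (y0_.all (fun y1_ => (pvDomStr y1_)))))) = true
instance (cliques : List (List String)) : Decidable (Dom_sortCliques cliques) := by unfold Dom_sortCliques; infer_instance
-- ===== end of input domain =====

-- B replaces A's one-pass dict accumulation by a two-pass group-by (dedup the keys, then filter per key); same return value, objective: alternative.

-- ===== PORT A =====
-- c.rsplit("-",1)[1]: hand port of the builtin via rfind + slice — exact whenever "-" occurs in c
-- (the no-"-" case raises IndexError in Python and is excluded by Pre_; there this helper returns c).
def pvSuffix (c : String) : String :=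
  let i := PySem.Str.rfind c "-"
  if i < 0 then c else PySem.Str.slice c (some (i + 1)) none

-- len(set([c.rsplit("-",1)[1] for c in clique]))
def pvKey (clique : List String) : Int :=
  PySem.Set.len (PySem.Set.ofList (clique.map pvSuffix))

def sortCliques (cliques : List (List String)) : List (Int × List (List String)) :=
  (cliques.foldl
    (fun result clique =>
      let lClique := pvKey clique
      let result := if result.contains lClique then result
                    else result.insert lClique ([] : List (List String))
      result.insert lClique (result.getD lClique [] ++ [clique]))
    PySem.Dict.empty).items

-- ===== PORT B =====
def sortCliques_alt (cliques : List (List String)) : List (Int × List (List String)) :=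
  let ks := cliques.map pvKey
  (PySem.List.dedup ks).map
    (fun k => (k, ((cliques.zip ks).filter (fun p => p.2 == k)).map (·.1)))

-- ===== PRECONDITION & SPEC =====
-- Pre_ excludes cliques containing a string with no "-": there c.rsplit("-",1)[1] raises IndexError in both A and B.
def Pre_sortCliques (cliques : List (List String)) : Prop :=
  ∀ cl ∈ cliques, ∀ c ∈ cl, 0 ≤ PySem.Str.rfind c "-"
instance (cliques : List (List String)) : Decidable (Pre_sortCliques cliques) := by unfold Pre_sortCliques; infer_instance

def pvWitness_sortCliques : List (List String) := [["a-b", "c-d"], ["x-y"]]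

def Spec_sortCliques (cliques : List (List String)) (out : List (Int × List (List String))) : Prop := out = sortCliques_alt cliques
instance (cliques : List (List String)) (out : List (Int × List (List String))) : Decidable (Spec_sortCliques cliques out) := by unfold Spec_sortCliques; infer_instance

-- ===== CLAIM (what is proved, stated in full; the proofs are below) =====
def Claim_equal_sortCliques : Prop := ∀ (cliques : List (List String)), Dom_sortCliques cliques → Pre_sortCliques cliques → Spec_sortCliques cliques (sortCliques cliques)

-- ===== LEMMAS AND PROOFS =====

-- A's loop body ("if key not in result: result[key]=[]; result[key].append(x)") is Dict.modify.
theorem pvStep_eq_modify (d : PySem.Dict Int (List (List String))) (k : Int) (x : List String) :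
    (let d1 := if d.contains k then d else d.insert k ([] : List (List String));
     d1.insert k (d1.getD k [] ++ [x])) = d.modify k [] (· ++ [x]) := by
  by_cases h : d.contains k
  · simp [h, PySem.Dict.modify]
  · simp only [h]
    rw [if_neg (by simp), PySem.Dict.getD_insert_self, PySem.Dict.insert_insert_self,
      PySem.Dict.modify, PySem.Dict.getD_of_not_contains d [] (by simpa using h)]

theorem pvFilter_eq (cliques : List (List String)) (k : Int) :
    cliques.filter (fun cl => pvKey cl == k)
      = ((cliques.zip (cliques.map pvKey)).filter (fun p => p.2 == k)).map (·.1) := by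
  induction cliques with
  | nil => rfl
  | cons c cs ih =>
    by_cases h : pvKey c = k
    · simp [h, ih]
    · simp [h, ih]

-- the accumulated entry of a grouping fold: already-grouped prefix ++ the matching tail elements
theorem pvFoldl_modify_getD {κ : Type} [BEq κ] [LawfulBEq κ] [DecidableEq κ] {β : Type}
    (l : List β) (key : β → κ) (d : PySem.Dict κ (List β)) (c : κ) :
    (l.foldl (fun d x => d.modify (key x) [] (· ++ [x])) d).getD c []
      = d.getD c [] ++ l.filter (fun x => key x == c) := by
  induction l generalizing d with
  | nil => simp
  | cons x xs ih =>
    simp only [List.foldl_cons, List.filter_cons, ih,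
      PySem.Dict.getD_modify d (key x) c [] (· ++ [x])]
    by_cases h : key x = c
    · simp [h]
    · rw [if_neg (fun hh => h hh.symm)]
      simp [h]

-- ===== VERDICT (by name: the statement is the Claim_ definition above) =====
theorem sortCliques_spec : Claim_equal_sortCliques := by
  intro cliques _ _
  show sortCliques cliques = sortCliques_alt cliques
  unfold sortCliques sortCliques_alt
  have hstep :
      (fun (result : PySem.Dict Int (List (List String))) clique =>
        let lClique := pvKey clique
        let result := if result.contains lClique then result
                      else result.insert lClique ([] : List (List String))
        result.insert lClique (result.getD lClique [] ++ [clique]))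
      = (fun d clique => d.modify (pvKey clique) [] (· ++ [clique])) := by
    funext d clique
    exact pvStep_eq_modify d (pvKey clique) clique
  rw [hstep]
  set d := cliques.foldl (fun d clique => d.modify (pvKey clique) [] (· ++ [clique]))
    PySem.Dict.empty with hd
  have hkeys : d.keys = PySem.List.dedup (cliques.map pvKey) := by
    rw [hd, PySem.Dict.keys_foldl_modify_key cliques pvKey [] (fun _ clique v => v ++ [clique])]
    simp [PySem.Set.update_nil_left]
  have hnd : d.keys.Nodup := by
    rw [hd]
    exact PySem.Dict.nodup_keys_foldl_modify_key cliques pvKey [] _ _ (by simp)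
  have hgetD : ∀ k, d.getD k [] = ((cliques.zip (cliques.map pvKey)).filter (fun p => p.2 == k)).map (·.1) := by
    intro k
    rw [hd, pvFoldl_modify_getD cliques pvKey PySem.Dict.empty k]
    simp [pvFilter_eq]
  rw [PySem.Dict.items_eq_map_keys d hnd [], hkeys]
  refine List.map_congr_left ?_
  intro k _
  rw [hgetD]
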